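-- pv_equiv track=rewrite | github.com/rezaquant/pepsy | pepsy/boundary_states.py | _format_structure_lines
-- ===== SOURCE A (Python) =====
-- def _format_structure_lines(lines, max_width=None):
--     """Return structure lines optionally chunked to ``max_width``."""
--     if max_width is None:
--         return list(lines)
--
--     if not isinstance(max_width, int) or max_width <= 0:
--         raise ValueError("max_width must be a positive integer or None")
--
--     width = max(len(line) for line in lines)
--     padded = [line.ljust(width) for line in lines]
--     wrapped = []
--
--     for start in range(0, width, max_width):
--         end = start + max_width
--         for line in padded:
--             wrapped.append(line[start:end].rstrip())
--         if end < width: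
--             wrapped.append("")
--     return wrapped
-- ===== SOURCE B (Python) =====
-- def _format_structure_lines(lines, max_width=None):
--     """Return structure lines optionally chunked to ``max_width``."""
--     if max_width is None:
--         return list(lines)
--
--     if not isinstance(max_width, int) or max_width <= 0:
--         raise ValueError("max_width must be a positive integer or None")
--
--     width = max(len(line) for line in lines)
--     rows = [[line.ljust(width)[s:s + max_width].rstrip()
--              for s in range(0, width, max_width)]
--             for line in lines]
--
--     out = []
--     for block in zip(*rows):
--         if out:
--             out.append("")
--         out.extend(block)
--     return out
-- ===== Notes on version B (the rewrite author's own statement) =====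
-- stated objective: alternative
-- what changed: B chunks each padded line once into a per-line row of rstripped slices, transposes the table with zip(*rows) and joins the resulting blocks with a separator-before-nonempty-output rule, instead of A's block-major nested start/line loops with a conditional separator appended after each block.
import Mathlib
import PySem

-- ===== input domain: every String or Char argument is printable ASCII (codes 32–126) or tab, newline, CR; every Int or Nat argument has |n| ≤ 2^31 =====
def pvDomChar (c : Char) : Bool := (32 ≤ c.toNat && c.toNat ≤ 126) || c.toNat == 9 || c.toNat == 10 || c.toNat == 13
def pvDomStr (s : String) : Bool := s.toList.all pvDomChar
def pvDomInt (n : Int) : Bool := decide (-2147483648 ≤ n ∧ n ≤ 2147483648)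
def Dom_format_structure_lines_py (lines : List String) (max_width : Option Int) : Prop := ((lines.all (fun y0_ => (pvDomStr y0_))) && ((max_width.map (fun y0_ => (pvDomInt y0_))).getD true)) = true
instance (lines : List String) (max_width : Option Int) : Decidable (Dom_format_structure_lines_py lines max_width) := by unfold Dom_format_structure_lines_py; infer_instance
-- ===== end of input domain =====

-- B builds a per-line chunk table, transposes it (zip) and joins the blocks with a
-- separator-before rule, instead of A's pad-everything nested start/line loops with a
-- conditional separator appended after each block (objective: alternative decomposition).


-- ===== PORT A =====
-- line.ljust(w) ported by hand (PySem has no ljust): s + ' ' * (w - len(s)); exact for w : Nat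
def pvLjust (l : List Char) (w : Nat) : List Char := l ++ List.replicate (w - l.length) ' '

def format_structure_lines_py (lines : List String) (max_width : Option Int) : List String :=
  match max_width with
  | none => lines
  | some mw =>
    if mw ≤ 0 then []        -- ValueError, outside Pre_
    else
      match PySem.List.max? (lines.map (fun l => (l.toList.length : Int))) id with
      | none => []           -- max() of empty sequence: ValueError, outside Pre_
      | some width =>
        let padded := lines.map (fun l => pvLjust l.toList width.toNat)
        (PySem.List.pyRange 0 width mw).foldl
          (fun wrapped start =>
            let stop := start + mw
            let wrapped := padded.foldl
              (fun w p => w ++ [String.ofList (PySem.Chars.rstrip (PySem.List.slice p (some start) (some stop)))]) wrapped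
            if stop < width then wrapped ++ [""] else wrapped)
          []

-- ===== PORT B =====
def pvChunkRow (p : List Char) (width mw : Int) : List String :=
  (PySem.List.pyRange 0 width mw).map
    (fun s => String.ofList (PySem.Chars.rstrip (PySem.List.slice p (some s) (some (s + mw)))))

-- zip(*rows): truncate to the shortest row, column-major
def pvZipStar (rows : List (List String)) : List (List String) :=
  match (rows.map List.length).min? with
  | none => []
  | some n => (List.range n).map (fun i => rows.map (fun r => r.getD i ""))

def format_structure_lines_py_alt (lines : List String) (max_width : Option Int) : List String :=
  match max_width with
  | none => lines
  | some mw =>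
    if mw ≤ 0 then []        -- ValueError, outside Pre_
    else
      match PySem.List.max? (lines.map (fun l => (l.toList.length : Int))) id with
      | none => []           -- max() of empty sequence: ValueError, outside Pre_
      | some width =>
        let rows := lines.map (fun l => pvChunkRow (pvLjust l.toList width.toNat) width mw)
        (pvZipStar rows).foldl
          (fun out block => (if out.isEmpty then out else out ++ [""]) ++ block) []

-- ===== PRECONDITION & SPEC =====
-- Pre_ excludes exactly the inputs where A raises ValueError: a non-positive max_width,
-- and an empty `lines` with a numeric max_width (max() of an empty sequence).
def Pre_format_structure_lines_py (lines : List String) (max_width : Option Int) : Prop :=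
  0 < max_width.getD 1 ∧ (max_width = none ∨ lines ≠ [])

instance (lines : List String) (max_width : Option Int) : Decidable (Pre_format_structure_lines_py lines max_width) := by unfold Pre_format_structure_lines_py; infer_instance

def pvWitness_format_structure_lines_py : List String × Option Int := (["ab c", "x"], some 2)

def Spec_format_structure_lines_py (lines : List String) (max_width : Option Int) (out : List String) : Prop := out = format_structure_lines_py_alt lines max_width
instance (lines : List String) (max_width : Option Int) (out : List String) : Decidable (Spec_format_structure_lines_py lines max_width out) := by unfold Spec_format_structure_lines_py; infer_instance

-- ===== CLAIM (what is proved, stated in full; the proofs are below) =====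
def Claim_equal_format_structure_lines_py : Prop := ∀ (lines : List String) (max_width : Option Int), Dom_format_structure_lines_py lines max_width → Pre_format_structure_lines_py lines max_width → Spec_format_structure_lines_py lines max_width (format_structure_lines_py lines max_width)

-- ===== LEMMAS AND PROOFS =====

-- max? of a nonempty list is some
theorem pv_max?_ne_none (xs : List Int) (h : xs ≠ []) :
    ∃ m, PySem.List.max? xs id = some m := by
  cases h' : PySem.List.max? xs id with
  | none => exact absurd ((PySem.List.max?_eq_none_iff xs id).mp h') h
  | some m => exact ⟨m, rfl⟩

-- appending a mapped element one at a time is map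
theorem pv_foldl_push {α β : Type} (f : α → β) (xs : List α) (acc : List β) :
    xs.foldl (fun w p => w ++ [f p]) acc = acc ++ xs.map f := by
  induction xs generalizing acc with
  | nil => simp
  | cons x t ih => simp [List.foldl, ih]

-- A's outer loop flattened
theorem pv_foldl_flat {α β : Type} (h : α → List β) (ss : List α) (acc : List β) :
    ss.foldl (fun w s => w ++ h s) acc = acc ++ ss.flatMap h := by
  induction ss generalizing acc with
  | nil => simp
  | cons s t ih => simp [List.foldl, ih]

-- min? of a nonempty constant list
theorem pv_foldl_min_const {α : Type} (t : List α) (k : Nat) :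
    (t.map (fun _ => k)).foldl min k = k := by
  induction t with
  | nil => rfl
  | cons x s ih => simpa using ih

theorem pv_min?_const {α : Type} (xs : List α) (k : Nat) (h : xs ≠ []) :
    (xs.map (fun _ => k)).min? = some k := by
  cases xs with
  | nil => exact absurd rfl h
  | cons x t =>
      simp only [List.map_cons, List.min?_cons']
      rw [pv_foldl_min_const]

-- zip(*·) of a rectangular table built by mapping is the transpose
theorem pv_zipStar_transpose {α : Type} (xs : List α) (ss : List Int)
    (f : α → Int → String) (h : xs ≠ []) :
    pvZipStar (xs.map (fun x => ss.map (f x))) = ss.map (fun s => xs.map (fun x => f x s)) := by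
  have h1 : ((xs.map (fun x => ss.map (f x))).map List.length).min? = some ss.length := by
    rw [List.map_map]
    have : (List.length ∘ fun x => List.map (f x) ss) = fun _ => ss.length := by
      funext x; simp
    rw [this]
    exact pv_min?_const xs ss.length h
  unfold pvZipStar
  rw [h1]
  apply List.ext_getElem
  · simp
  · intro i h1 h2
    simp only [List.getElem_map, List.getElem_range, List.map_map]
    refine List.map_congr_left (fun x _ => ?_)
    have hss : i < ss.length := by simpa using h2
    have hi : i < (ss.map (f x)).length := by simpa using hss
    simp only [Function.comp_apply]
    rw [List.getD_eq_getElem _ _ hi, List.getElem_map]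

-- both sides of the final comparison, as closed forms over `List.range n`
theorem pv_A_form (L : Nat → List String) (n : Nat) :
    (List.range (n+1)).flatMap (fun k => L k ++ if k + 1 < n + 1 then [""] else [])
      = (List.range n).flatMap (fun k => L k ++ [""]) ++ L n := by
  rw [List.range_succ, List.flatMap_append]
  have h1 : (List.range n).flatMap (fun k => L k ++ if k + 1 < n + 1 then [""] else [])
      = (List.range n).flatMap (fun k => L k ++ [""]) := by
    refine List.flatMap_congr (fun k hk => ?_)
    have : k < n := List.mem_range.mp hk
    rw [if_pos (by omega)]
  rw [h1]
  simp

theorem pv_B_form (L : Nat → List String) (n : Nat) (hL : ∀ k, L k ≠ []) :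
    ((List.range (n+1)).map L).foldl (fun out b => (if out.isEmpty then out else out ++ [""]) ++ b) []
      = (List.range n).flatMap (fun k => L k ++ [""]) ++ L n := by
  induction n with
  | zero => simp [List.range_succ]
  | succ m ih =>
      rw [List.range_succ, List.map_append, List.foldl_append, ih]
      have hne : ((List.range m).flatMap (fun k => L k ++ [""]) ++ L m).isEmpty = false := by
        rw [List.isEmpty_eq_false_iff]
        simp only [ne_eq, List.append_eq_nil_iff, not_and]
        intro _ h2
        exact hL m h2
      simp only [List.map_cons, List.map_nil, List.foldl_cons, List.foldl_nil, hne,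
        Bool.false_eq_true, if_false]
      conv_rhs => rw [List.range_succ, List.flatMap_append]
      simp [List.append_assoc]

-- condition `0 + mw*k + mw < width` ↔ `k+1 < n` for the block count n of range(0, width, mw)
theorem pv_cond_iff (width mw : Int) (hmw : 0 < mw) (n : Nat)
    (hn : (n : Int) = (width - 0 + mw - 1) / mw) (k : Nat) :
    (0 + mw * (k : Int) + mw < width ↔ k + 1 < n) := by
  have hq : (width - 0 + mw - 1) / mw = (width - 1) / mw + 1 := by
    have : width - 0 + mw - 1 = (width - 1) + 1 * mw := by ring
    rw [this, Int.add_mul_ediv_right _ _ (by omega : mw ≠ 0)]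
  have key : mw * ((k : Int) + 1) < width ↔ ((k : Int) + 1) < (width - 1) / mw + 1 := by
    constructor
    · intro h
      have : (k : Int) + 1 ≤ (width - 1) / mw :=
        (Int.le_ediv_iff_mul_le hmw).mpr (by nlinarith)
      omega
    · intro h
      have : ((k : Int) + 1) * mw ≤ width - 1 :=
        (Int.le_ediv_iff_mul_le hmw).mp (by omega)
      nlinarith
  have : (0 + mw * (k : Int) + mw) = mw * ((k : Int) + 1) := by ring
  rw [this, key, ← hq, ← hn]
  omega

theorem pv_if_push (c : Prop) [Decidable c] (w X : List String) :
    (if c then w ++ (X ++ [""]) else w ++ X) = w ++ (X ++ if c then [""] else []) := by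
  split <;> simp

-- ===== VERDICT (by name: the statement is the Claim_ definition above) =====
theorem format_structure_lines_py_spec : Claim_equal_format_structure_lines_py := by
  intro lines mw? _ pre
  unfold Spec_format_structure_lines_py
  cases mw? with
  | none => rfl
  | some mw =>
    have hmw : 0 < mw := by simpa [Pre_format_structure_lines_py] using pre.1
    have hne : lines ≠ [] := by
      rcases pre.2 with h | h
      · exact absurd h (by simp)
      · exact h
    have hmapne : lines.map (fun l => (l.toList.length : Int)) ≠ [] := by simpa using hne
    obtain ⟨width, hmax⟩ := pv_max?_ne_none _ hmapne
    have hgt : ¬ mw ≤ 0 := by omega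
    simp only [format_structure_lines_py, format_structure_lines_py_alt, hgt, if_false, hmax,
      pvChunkRow]
    rw [pv_zipStar_transpose lines (PySem.List.pyRange 0 width mw)
      (fun l s => String.ofList (PySem.Chars.rstrip
        (PySem.List.slice (pvLjust l.toList width.toNat) (some s) (some (s + mw))))) hne]
    simp only [pv_foldl_push, pv_if_push, List.append_assoc, pv_foldl_flat, List.nil_append,
      List.map_map, Function.comp_def]
    rw [PySem.List.pyRange_of_pos 0 width hmw]
    by_cases hw : (0:Int) < width
    · rw [if_pos hw]
      have hq0 : (0:Int) ≤ (width - 0 + mw - 1) / mw := Int.ediv_nonneg (by omega) (by omega)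
      have hq1 : (1:Int) ≤ (width - 0 + mw - 1) / mw := by
        have h2 : width - 0 + mw - 1 = (width - 1) + 1 * mw := by ring
        have h3 : (width - 0 + mw - 1) / mw = (width - 1) / mw + 1 := by
          rw [h2, Int.add_mul_ediv_right _ _ (by omega : mw ≠ 0)]
        have h4 : (0:Int) ≤ (width - 1) / mw := Int.ediv_nonneg (by omega) (by omega)
        omega
      obtain ⟨m, hm⟩ : ∃ m, ((width - 0 + mw - 1) / mw).toNat = m + 1 :=
        ⟨((width - 0 + mw - 1) / mw).toNat - 1, by omega⟩
      rw [hm]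
      simp only [List.flatMap_map, List.map_map, Function.comp_def]
      have hnInt : ((m + 1 : Nat) : Int) = (width - 0 + mw - 1) / mw := by
        push_cast
        omega
      have hcond := pv_cond_iff width mw hmw (m + 1) hnInt
      simp only [hcond]
      rw [pv_A_form, pv_B_form _ m (fun k => by simpa using hne)]
    · rw [if_neg hw]
      simp
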